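-- pv_equiv track=rewrite | github.com/raquelduenass/codigo_sgae | softening_prueba.py | join_labels
-- ===== SOURCE A (Python) =====
-- def join_labels(pred, silence):
--     labels = ['' for x in range(50)]
--     j = 0
--     for i in range(len(pred)):
--         while silence[j] != '':
--             labels[j] = 'S'
--             j = j+1
--         labels[j] = pred[i]
--         j = j+1
--     return labels
-- ===== SOURCE B (Python) =====
-- def join_labels(pred, silence):
--     # Single pass over silence: consume predictions at empty slots, mark 'S'
--     # elsewhere, stop once all predictions are placed, then pad to 50.
--     head = []
--     k = 0
--     for s in silence:
--         if k == len(pred):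
--             break
--         if s != '':
--             head.append('S')
--         else:
--             head.append(pred[k])
--             k += 1
--     return head + [''] * (50 - len(head))
-- ===== Notes on version B (the rewrite author's own statement) =====
-- stated objective: simpler
-- what changed: Replaces the preallocated 50-slot array with nested per-prediction for/while index loops by a single for-loop over silence that builds the labelled prefix directly (consuming predictions at empty slots) and then pads with '' to length 50.
import Mathlib
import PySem

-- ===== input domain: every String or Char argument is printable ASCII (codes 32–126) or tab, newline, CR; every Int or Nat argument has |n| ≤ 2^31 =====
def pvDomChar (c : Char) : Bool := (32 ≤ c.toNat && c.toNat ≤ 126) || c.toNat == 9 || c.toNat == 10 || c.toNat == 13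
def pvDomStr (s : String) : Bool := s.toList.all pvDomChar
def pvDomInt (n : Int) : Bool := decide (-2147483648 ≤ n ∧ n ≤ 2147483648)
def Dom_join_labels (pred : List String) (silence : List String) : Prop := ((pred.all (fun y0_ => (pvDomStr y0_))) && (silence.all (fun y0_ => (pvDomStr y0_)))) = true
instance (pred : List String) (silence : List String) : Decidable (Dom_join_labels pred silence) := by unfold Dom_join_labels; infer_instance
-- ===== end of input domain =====

-- B builds the labelled prefix in one pass over silence and pads to 50, instead of
-- A's nested per-prediction for/while loops over a preallocated 50-slot array
-- (objective: simpler).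

-- ===== PORT A =====
-- inner 'while silence[j] != '':' — fuel = remaining length of silence; when silence[j]
-- is out of range Python raises IndexError (excluded by Pre_), the port just stops.
-- j is always ≥ 0, so Nat indexing with l[j]? is exact for Python's silence[j].
def joinSkipA (silence : List String) : Nat → Nat → List String → List String × Nat
  | 0, j, labels => (labels, j)
  | fuel + 1, j, labels =>
      match silence[j]? with
      | none => (labels, j)                 -- IndexError in Python; outside Pre_
      | some s =>
          if s ≠ "" then joinSkipA silence fuel (j + 1) (labels.set j "S")
          else (labels, j)

-- 'for i in range(len(pred)):' — structural recursion over pred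
def joinLoopA (silence : List String) : List String → Nat → List String → List String
  | [], _, labels => labels
  | p :: ps, j, labels =>
      let r := joinSkipA silence (silence.length - j) j labels
      joinLoopA silence ps (r.2 + 1) (r.1.set r.2 p)

def join_labels (pred : List String) (silence : List String) : List String :=
  joinLoopA silence pred 0 (List.replicate 50 "")

-- ===== PORT B =====
-- the single 'for s in silence:' loop of Source B, with the break when k == len(pred);
-- pred[k] is only read with k < pred.length, so getD is exact there.
def buildHeadB (pred : List String) : List String → Nat → List String → List String
  | [], _, head => head
  | s :: rest, k, head =>
      if k = pred.length then head
      else if s ≠ "" then buildHeadB pred rest k (head ++ ["S"])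
      else buildHeadB pred rest (k + 1) (head ++ [pred.getD k ""])

def join_labels_alt (pred : List String) (silence : List String) : List String :=
  let head := buildHeadB pred silence 0 []
  head ++ List.replicate (50 - head.length) ""

-- ===== PRECONDITION & SPEC =====
-- A raises IndexError exactly when fewer than len(pred) empty slots occur among the
-- first 50 entries of silence (it runs off silence, or writes past the 50 labels).
def Pre_join_labels (pred : List String) (silence : List String) : Prop :=
  pred.length ≤ (silence.take 50).count ""
instance (pred : List String) (silence : List String) : Decidable (Pre_join_labels pred silence) := by unfold Pre_join_labels; infer_instance
def pvWitness_join_labels : List String × List String := (["a", "b"], ["x", "", "", "y"])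

def Spec_join_labels (pred : List String) (silence : List String) (out : List String) : Prop := out = join_labels_alt pred silence
instance (pred : List String) (silence : List String) (out : List String) : Decidable (Spec_join_labels pred silence out) := by unfold Spec_join_labels; infer_instance

-- ===== CLAIM (what is proved, stated in full; the proofs are below) =====
def Claim_equal_join_labels : Prop := ∀ (pred : List String) (silence : List String), Dom_join_labels pred silence → Pre_join_labels pred silence → Spec_join_labels pred silence (join_labels pred silence)

-- ===== LEMMAS AND PROOFS =====

-- reference function: label sequence produced while predictions remain
def markRef : List String → List String → List String
  | _, [] => []
  | ps, s :: rest =>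
      if ps.isEmpty then []
      else if s ≠ "" then "S" :: markRef ps rest
      else ps.headD "" :: markRef ps.tail rest

-- B equals the reference
theorem buildHeadB_eq (pred : List String) :
    ∀ (t : List String) (k : Nat) (acc : List String), k ≤ pred.length →
      buildHeadB pred t k acc = acc ++ markRef (pred.drop k) t := by
  intro t
  induction t with
  | nil => intro k acc _; simp [buildHeadB, markRef]
  | cons s rest ih =>
      intro k acc hk
      by_cases hke : k = pred.length
      · simp [buildHeadB, markRef, hke, List.drop_eq_nil_of_le]
      · have hklt : k < pred.length := lt_of_le_of_ne hk hke
        have hdrop : pred.drop k = pred.getD k "" :: pred.drop (k + 1) := by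
          have h1 : pred.drop k = pred[k] :: pred.drop (k + 1) :=
            List.drop_eq_getElem_cons hklt
          have h2 : pred.getD k "" = pred[k] := by
            simp [List.getD_eq_getElem?_getD, List.getElem?_eq_getElem hklt]
          rw [h1, h2]
        by_cases hs : s = ""
        · rw [buildHeadB]
          simp only [hke, hs, if_false, ite_not]
          rw [ih (k + 1) _ hklt, hdrop]
          simp [markRef]
        · rw [buildHeadB]
          simp only [hke, if_false, if_pos hs]
          rw [ih k _ hk, hdrop]
          simp [markRef, hs]

theorem markRef_len_le (n : Nat) :
    ∀ (t ps : List String), ps.length ≤ (t.take n).count "" → (markRef ps t).length ≤ n := by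
  induction n with
  | zero =>
      intro t ps h
      simp at h
      cases t with
      | nil => simp [markRef]
      | cons s rest =>
          cases ps with
          | nil => simp [markRef]
          | cons p ps' => simp at h
  | succ m ih =>
      intro t ps h
      cases t with
      | nil => simp [markRef]
      | cons s rest =>
          cases ps with
          | nil => simp [markRef]
          | cons p ps' =>
              by_cases hs : s = ""
              · subst hs
                simp at h
                have := ih rest ps' (by omega)
                simp [markRef]
                omega
              · simp [hs] at h
                have := ih rest (p :: ps') (by simpa using h)
                simp [markRef, hs] at this ⊢
                omega

-- unfolding markRef across the non-empty prefix of t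
theorem markRef_cons_split (p : String) (ps : List String) :
    ∀ (t : List String), t.count "" ≥ 1 →
      markRef (p :: ps) t =
        List.replicate (t.takeWhile (fun s => s ≠ "")).length "S"
          ++ p :: markRef ps (t.drop ((t.takeWhile (fun s => s ≠ "")).length + 1)) := by
  intro t
  induction t with
  | nil => intro h; simp at h
  | cons s rest ih =>
      intro h
      by_cases hs : s = ""
      · subst hs
        rw [List.takeWhile_cons_of_neg (by simp)]
        simp [markRef]
      · have hr : rest.count "" ≥ 1 := by simpa [List.count_cons, hs] using h
        rw [List.takeWhile_cons_of_pos (by simp [hs]), List.length_cons, List.drop_succ_cons]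
        rw [show markRef (p :: ps) (s :: rest) = "S" :: markRef (p :: ps) rest from by
          simp [markRef, hs]]
        rw [ih hr]
        simp [List.replicate_succ]

-- the inner while loop of A, on the invariant shape of labels
theorem joinSkipA_spec (silence : List String) :
    ∀ (t X : List String), silence.drop X.length = t →
      (t.takeWhile (fun s => s ≠ "")).length < t.length →
      X.length + (t.takeWhile (fun s => s ≠ "")).length ≤ 50 →
      joinSkipA silence t.length X.length (X ++ List.replicate (50 - X.length) "") =
        ((X ++ List.replicate (t.takeWhile (fun s => s ≠ "")).length "S")
            ++ List.replicate (50 - (X.length + (t.takeWhile (fun s => s ≠ "")).length)) "",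
         X.length + (t.takeWhile (fun s => s ≠ "")).length) := by
  intro t
  induction t with
  | nil => intro X _ hlt _; simp at hlt
  | cons s rest ih =>
      intro X hdrop hlt hle
      have hget : silence[X.length]? = some s := by
        have h : (silence.drop X.length).head? = some s := by rw [hdrop]; rfl
        rwa [List.head?_drop] at h
      by_cases hs : s = ""
      · subst hs
        have htw : (("" : String) :: rest).takeWhile (fun x => x ≠ "") = [] :=
          List.takeWhile_cons_of_neg (by simp)
        rw [htw, List.length_nil]
        rw [show (("" : String) :: rest).length = rest.length + 1 from rfl, joinSkipA]
        simp [hget]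
      · have htw : (s :: rest).takeWhile (fun x => x ≠ "") =
            s :: rest.takeWhile (fun x => x ≠ "") :=
          List.takeWhile_cons_of_pos (by simp [hs])
        rw [htw] at hlt hle ⊢
        set u := (rest.takeWhile (fun x => x ≠ "")).length with hu
        simp only [List.length_cons] at hlt hle ⊢
        have hXlt : X.length < 50 := by omega
        have hset : (X ++ List.replicate (50 - X.length) "").set X.length "S"
            = (X ++ ["S"]) ++ List.replicate (50 - (X.length + 1)) "" := by
          have h50 : 50 - X.length = (50 - (X.length + 1)) + 1 := by omega
          rw [List.set_append_right _ _ (le_refl _)]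
          simp [h50, List.replicate_succ]
        have hdrop' : silence.drop (X ++ ["S"]).length = rest := by
          have h1 : (X ++ ["S"]).length = X.length + 1 := by simp
          have h2 : silence.drop (X.length + 1) = (silence.drop X.length).drop 1 := by
            rw [List.drop_drop]
          rw [h1, h2, hdrop]
          rfl
        have ihh := ih (X ++ ["S"]) hdrop' (by omega)
          (by simp only [List.length_append, List.length_cons, List.length_nil]; omega)
        have hXl : (X ++ ["S"]).length = X.length + 1 := by simp
        rw [hXl] at ihh
        rw [joinSkipA]
        simp only [hget]
        rw [if_pos hs, hset, ihh]
        have e2 : X.length + (u + 1) = X.length + 1 + u := by omega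
        refine Prod.ext ?_ (by omega)
        rw [e2, List.replicate_succ]
        simp only [List.append_assoc, List.cons_append]
        rw [← hu]
        simp only [List.nil_append]

-- takeWhile length < count-positive length helper
theorem takeWhile_lt_of_count (t : List String) (h : t.count "" ≥ 1) :
    (t.takeWhile (fun s => s ≠ "")).length < t.length := by
  induction t with
  | nil => simp at h
  | cons s rest ih =>
      by_cases hs : s = ""
      · subst hs
        rw [List.takeWhile_cons_of_neg (by simp)]
        simp
      · have hr : rest.count "" ≥ 1 := by simpa [List.count_cons, hs] using h
        have := ih hr
        rw [List.takeWhile_cons_of_pos (by simp [hs])]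
        simp only [List.length_cons]
        omega

-- count of "" in what remains after the skipped prefix
theorem count_drop_skip (t : List String) (h : t.count "" ≥ 1) :
    (t.drop ((t.takeWhile (fun s => s ≠ "")).length + 1)).count "" = t.count "" - 1 := by
  induction t with
  | nil => simp at h
  | cons s rest ih =>
      by_cases hs : s = ""
      · subst hs
        rw [List.takeWhile_cons_of_neg (by simp)]
        simp
      · have hr : rest.count "" ≥ 1 := by simpa [List.count_cons, hs] using h
        have := ih hr
        rw [List.takeWhile_cons_of_pos (by simp [hs]), List.length_cons, List.drop_succ_cons,
          this]
        simp [hs]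

-- the outer for loop of A computes markRef, on the invariant shape of labels
theorem joinLoopA_spec (silence : List String) :
    ∀ (ps : List String) (X : List String) (t : List String), silence.drop X.length = t →
      ps.length ≤ t.count "" →
      X.length + (markRef ps t).length ≤ 50 →
      joinLoopA silence ps X.length (X ++ List.replicate (50 - X.length) "") =
        (X ++ markRef ps t) ++ List.replicate (50 - (X.length + (markRef ps t).length)) "" := by
  intro ps
  induction ps with
  | nil =>
      intro X t _ _ _
      cases t <;> simp [joinLoopA, markRef]
  | cons p ps' ih =>
      intro X t hdrop hcnt hle
      have hc1 : t.count "" ≥ 1 := by simp at hcnt; omega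
      have hsplit := markRef_cons_split p ps' t hc1
      set u := (t.takeWhile (fun s => s ≠ "")).length with hu
      set t' := t.drop (u + 1) with ht'
      have htlen : t.length = silence.length - X.length := by
        rw [← hdrop, List.length_drop]
      have htwlt : u < t.length := takeWhile_lt_of_count t hc1
      have hmlen : (markRef (p :: ps') t).length = u + 1 + (markRef ps' t').length := by
        rw [hsplit]; simp; omega
      have huleA : X.length + u ≤ 50 := by omega
      have hskip := joinSkipA_spec silence t X hdrop htwlt huleA
      rw [joinLoopA, htlen] at *
      rw [hskip]
      -- the set of pred p at index X.length + u
      have hXu : X.length + u < 50 := by omega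
      have hset : ((X ++ List.replicate u "S") ++ List.replicate (50 - (X.length + u)) "").set
            (X.length + u) p
          = ((X ++ List.replicate u "S") ++ [p]) ++ List.replicate (50 - (X.length + u + 1)) "" := by
        have hlen2 : (X ++ List.replicate u "S").length = X.length + u := by simp
        have h50 : 50 - (X.length + u) = (50 - (X.length + u + 1)) + 1 := by omega
        rw [← hlen2, List.set_append_right _ _ (le_refl _)]
        simp [h50, List.replicate_succ]
      rw [hset]
      have hX'len : ((X ++ List.replicate u "S") ++ [p]).length = X.length + u + 1 := by
        simp only [List.length_append, List.length_cons, List.length_nil, List.length_replicate]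
      have hdrop' : silence.drop ((X ++ List.replicate u "S") ++ [p]).length = t' := by
        rw [hX'len, ht']
        rw [← hdrop, List.drop_drop]
        congr 1
      have hcnt' : ps'.length ≤ t'.count "" := by
        have := count_drop_skip t hc1
        rw [← ht'] at this
        simp at hcnt
        omega
      have hle' : ((X ++ List.replicate u "S") ++ [p]).length + (markRef ps' t').length ≤ 50 := by
        rw [hX'len]; omega
      have := ih ((X ++ List.replicate u "S") ++ [p]) t' hdrop' hcnt' hle'
      rw [hX'len] at this
      rw [this, hsplit]
      have e50 : 50 - (X.length + u + 1 + (markRef ps' t').length)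
          = 50 - (X.length + (u + ((markRef ps' t').length + 1))) := by omega
      simp [List.append_assoc, e50]

theorem join_labels_spec : Claim_equal_join_labels := by
  unfold Claim_equal_join_labels
  intro pred silence _ hpre
  unfold Spec_join_labels join_labels join_labels_alt
  unfold Pre_join_labels at hpre
  have hcnt : pred.length ≤ silence.count "" :=
    le_trans hpre ((List.take_sublist 50 silence).count_le "")
  have hlen : (markRef pred silence).length ≤ 50 := markRef_len_le 50 silence pred hpre
  have hB : buildHeadB pred silence 0 [] = markRef pred silence := by
    simpa using buildHeadB_eq pred silence 0 [] (Nat.zero_le _)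
  have hA := joinLoopA_spec silence pred ([] : List String) silence rfl hcnt (by simpa using hlen)
  simp only [List.length_nil, Nat.zero_add, List.nil_append] at hA
  rw [show (List.replicate 50 "" : List String) = List.replicate (50 - 0) "" from rfl] at hA
  rw [hA, hB]
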